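-- pv_equiv track=rewrite | github.com/981377660LMT/algorithm-study | 11_动态规划/lis最长上升子序列问题/环形数组中的LIS.py | solve
-- ===== SOURCE A (Python) =====
-- from bisect import bisect_left
--
-- def solve(nums):
--     def LIS(left, right):
--         res = [nums[left]]
--         for i in range(left + 1, right + 1):
--             index = bisect_left(res, nums[i])
--             if index >= len(res):
--                 res.append(nums[i])
--             else:
--                 res[index] = nums[i]
--         return len(res)
--
--     n = len(nums)
--     nums = nums + nums
--     return max(LIS(x, x + n) for x in range(n))
-- ===== SOURCE B (Python) =====
-- def solve(nums):
--     n = len(nums)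
--     doubled = nums + nums
--     best = 0
--     for start in range(n):
--         window = doubled[start:start + n + 1]
--         dp = []
--         for v in window:
--             best_prev = 0
--             for u, d in zip(window, dp):
--                 if u < v and d > best_prev:
--                     best_prev = d
--             dp.append(best_prev + 1)
--         best = max(best, max(dp))
--     return best
-- ===== Notes on version B (the rewrite author's own statement) =====
-- stated objective: alternative
-- what changed: Replaced the patience-sorting (bisect_left tails array) inner LIS with the classic quadratic DP (dp[i] = 1 + max dp[j] over earlier j with smaller value) over each cyclic window, taken as an explicit slice of the doubled array; Pre_ excludes only the empty list, on which A's max() over an empty generator raises ValueError.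
import Mathlib
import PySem

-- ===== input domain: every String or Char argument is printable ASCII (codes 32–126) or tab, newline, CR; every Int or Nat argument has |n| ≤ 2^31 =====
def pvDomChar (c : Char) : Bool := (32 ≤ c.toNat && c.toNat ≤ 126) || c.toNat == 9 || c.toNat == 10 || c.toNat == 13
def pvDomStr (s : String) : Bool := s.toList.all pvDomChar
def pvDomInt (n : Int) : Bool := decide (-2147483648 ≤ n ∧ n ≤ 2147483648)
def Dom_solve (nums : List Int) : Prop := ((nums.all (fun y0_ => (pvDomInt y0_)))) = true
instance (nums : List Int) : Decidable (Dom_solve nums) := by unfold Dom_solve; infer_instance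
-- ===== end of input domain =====

-- A = max over all cyclic windows of a patience-sorting (bisect_left tails) LIS; B = the same
-- windows, taken as slices of the doubled list, with the classic quadratic DP inner LIS.

-- ===== PORT A =====
-- one pass of A's inner loop body: bisect_left, then append or overwrite
def pvLisStep (res : List Int) (v : Int) : List Int :=
  let index := PySem.List.bisectLeft res v
  if index ≥ res.length then res ++ [v] else res.set index v

-- A's inner LIS(left, right): the indices read are always in range, so pyGetD's default 0 is never used
def pvLIS (nums2 : List Int) (left right : Int) : Int :=
  let res :=
    (PySem.List.pyRange (left + 1) (right + 1) 1).foldl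
      (fun res i => pvLisStep res (PySem.List.pyGetD nums2 i 0))
      [PySem.List.pyGetD nums2 left 0]
  (res.length : Int)

def solve (nums : List Int) : Int :=
  let n := nums.length
  let nums2 := nums ++ nums
  (PySem.List.max? ((PySem.List.pyRange 0 (n : Int) 1).map (fun x => pvLIS nums2 x (x + (n : Int))))
      (fun y => y)).getD 0

-- ===== PORT B =====
-- quadratic DP over one window: dp[i] = 1 + best dp[j] among earlier smaller elements
def pvQuadLIS (window : List Int) : Int :=
  let dp :=
    window.foldl
      (fun dp v =>
        let bestPrev :=
          (window.zip dp).foldl (fun b ud => if ud.1 < v ∧ b < ud.2 then ud.2 else b) 0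
        dp ++ [bestPrev + 1])
      ([] : List Int)
  (PySem.List.max? dp (fun y => y)).getD 0

def solve_alt (nums : List Int) : Int :=
  let n := nums.length
  let doubled := nums ++ nums
  (PySem.List.pyRange 0 (n : Int) 1).foldl
    (fun best start =>
      let window := PySem.List.slice doubled (some start) (some (start + (n : Int) + 1))
      max best (pvQuadLIS window))
    0

-- ===== PRECONDITION & SPEC =====
-- Pre_ excludes only the empty list, on which A's max() over an empty generator raises ValueError
def Pre_solve (nums : List Int) : Prop := nums ≠ []
instance (nums : List Int) : Decidable (Pre_solve nums) := by unfold Pre_solve; infer_instance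
def pvWitness_solve : List Int := ([3, 1, 2])

def Spec_solve (nums : List Int) (out : Int) : Prop := out = solve_alt nums
instance (nums : List Int) (out : Int) : Decidable (Spec_solve nums out) := by unfold Spec_solve; infer_instance

-- ===== CLAIM (what is proved, stated in full; the proofs are below) =====
def Claim_equal_solve : Prop := ∀ (nums : List Int), Dom_solve nums → Pre_solve nums → Spec_solve nums (solve nums)

-- ===== LEMMAS AND PROOFS =====

-- `u < hi?` with `none` standing for +infinity
def pvOk (u : Int) : Option Int → Bool
  | none => true
  | some hi => decide (u < hi)

-- length of the longest strictly increasing subsequence of the REVERSED argument whose last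
-- element satisfies `pvOk . hi?` (recursion on the reversed list makes snoc steps definitional)
def pvLisR : List Int → Option Int → Nat
  | [], _ => 0
  | v :: t, hi? => if pvOk v hi? then max (pvLisR t hi?) (pvLisR t (some v) + 1) else pvLisR t hi?

def pvLisL (p : List Int) (hi? : Option Int) : Nat := pvLisR p.reverse hi?

-- the quantity the patience state tracks: how many tails are < hi? (all of them for `none`)
def pvCnt (res : List Int) : Option Int → Nat
  | none => res.length
  | some hi => res.countP (fun x => decide (x < hi))

theorem pvLisL_snoc (p : List Int) (v : Int) (hi? : Option Int) :
    pvLisL (p ++ [v]) hi? =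
      if pvOk v hi? then max (pvLisL p hi?) (pvLisL p (some v) + 1) else pvLisL p hi? := by
  simp [pvLisL, pvLisR]

-- bisect_left on a strictly sorted list is the length of the `< v` prefix
theorem pvBisect_eq (res : List Int) (v : Int) (hs : res.Pairwise (· < ·)) :
    PySem.List.bisectLeft res v = (res.takeWhile (fun x => decide (x < v))).length := by
  obtain ⟨h1, h2, h3⟩ := PySem.List.bisectLeft_spec res v (hs.imp le_of_lt)
  set p : Int → Bool := fun x => decide (x < v) with hp
  set t := res.takeWhile p with ht
  have htpre : t <+: res := List.takeWhile_prefix p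
  have htlen : t.length ≤ res.length := htpre.length_le
  have htget : ∀ (j : Nat) (hj : j < t.length), res[j]'(lt_of_lt_of_le hj htlen) < v := by
    intro j hj
    have := htpre.getElem hj
    have hmem : t[j] ∈ t := List.getElem_mem hj
    have := List.mem_takeWhile_imp hmem
    simp [hp] at this
    omega
  have hbnd : ∀ (hlt : t.length < res.length), ¬ res[t.length] < v := by
    intro hlt hcon
    have hdec : res.takeWhile p ++ res.dropWhile p = res := List.takeWhile_append_dropWhile
    have hdne : res.dropWhile p ≠ [] := by
      intro h0
      rw [h0, List.append_nil] at hdec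
      rw [ht, hdec] at hlt
      omega
    have hhead := List.head_dropWhile_not p hdne
    have hq : res[t.length]? = some ((res.dropWhile p).head hdne) := by
      conv_lhs => rw [← hdec]
      rw [List.getElem?_append_right le_rfl]
      obtain ⟨w, r', hw⟩ := List.exists_cons_of_ne_nil hdne
      simp [hw]
    rw [List.getElem?_eq_getElem hlt] at hq
    rw [Option.some_inj.mp hq] at hcon
    have hcon' : p ((List.dropWhile p res).head hdne) = true := by
      simp only [hp, decide_eq_true_eq]
      exact hcon
    simp [hcon'] at hhead
  rcases lt_trichotomy (PySem.List.bisectLeft res v) t.length with h | h | h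
  · exact absurd (h3 _ (lt_of_lt_of_le h htlen) le_rfl) (by simpa using htget _ h)
  · exact h
  · have hlt : t.length < res.length := lt_of_lt_of_le h h1
    exact absurd (h2 t.length hlt h) (hbnd hlt)

theorem pvSet_mid (t r : List Int) (w v : Int) :
    (t ++ w :: r).set t.length v = t ++ v :: r := by
  induction t with
  | nil => simp
  | cons a t ih => simp [List.set, ih]

-- one patience step preserves sortedness and updates every prefix count by the LIS snoc rule
theorem pvStep_inv (res : List Int) (v : Int) (hs : res.Pairwise (· < ·)) :
    (pvLisStep res v).Pairwise (· < ·) ∧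
    ∀ hi?, pvCnt (pvLisStep res v) hi? =
      if pvOk v hi? then max (pvCnt res hi?) (pvCnt res (some v) + 1) else pvCnt res hi? := by
  set p : Int → Bool := fun x => decide (x < v) with hp
  have hdec : res.takeWhile p ++ res.dropWhile p = res := List.takeWhile_append_dropWhile
  set t := res.takeWhile p with htdef
  set r := res.dropWhile p with hrdef
  have hbemerge : PySem.List.bisectLeft res v = t.length := pvBisect_eq res v hs
  have ht : ∀ x ∈ t, x < v := by
    intro x hx
    have := List.mem_takeWhile_imp hx
    simp [hp] at this; exact this
  have hsplit : res.Pairwise (· < ·) := hs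
  rw [← hdec] at hsplit
  rw [List.pairwise_append] at hsplit
  obtain ⟨hst, hsr, hcross⟩ := hsplit
  -- every element of r is ≥ v
  have hr : ∀ x ∈ r, v ≤ x := by
    intro x hx
    cases hre : r with
    | nil => rw [hre] at hx; simp at hx
    | cons w r' =>
      have hdne : res.dropWhile p ≠ [] := by rw [← hrdef, hre]; simp
      have hw : v ≤ w := by
        have hhd := List.head_dropWhile_not p hdne
        have hh? : (res.dropWhile p).head? = some w := by rw [← hrdef, hre]; rfl
        rw [List.head?_eq_head hdne] at hh?
        rw [Option.some_inj.mp hh?] at hhd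
        simp [hp] at hhd; exact hhd
      rw [hre] at hx hsr
      rcases List.mem_cons.mp hx with h | h
      · omega
      · have := (List.pairwise_cons.mp hsr).1 x h; omega
  have hcv : pvCnt res (some v) = t.length := by
    rw [pvCnt, ← hdec, List.countP_append]
    have h1 : t.countP p = t.length := List.countP_eq_length.mpr (by
      intro a ha; simp [hp]; exact ht a ha)
    have h2 : r.countP p = 0 := List.countP_eq_zero.mpr (by
      intro a ha; simp [hp]; exact hr a ha)
    simpa [hp] using by rw [← hp] at *; omega
  cases hre : r with
  | nil =>
    have hres : res = t := by rw [← hdec, hre, List.append_nil]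
    have hstep : pvLisStep res v = t ++ [v] := by
      simp only [pvLisStep, hbemerge]
      rw [if_pos (by rw [hres])]
      rw [hres]
    rw [hstep]
    constructor
    · rw [List.pairwise_append]
      exact ⟨hst, List.pairwise_singleton _ _, by
        intro a ha b hb; rw [List.mem_singleton.mp hb]; exact ht a ha⟩
    · intro hi?
      cases hi? with
      | none =>
        have h1 : pvCnt (t ++ [v]) none = t.length + 1 := by simp [pvCnt]
        have h2 : pvCnt res none = t.length := by rw [pvCnt, hres]
        rw [h1, h2, hcv]
        simp [pvOk]
      | some hi =>
        by_cases hvh : v < hi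
        · have hct : t.countP (fun x => decide (x < hi)) = t.length :=
            List.countP_eq_length.mpr (by intro a ha; simp; have := ht a ha; omega)
          have h1 : pvCnt (t ++ [v]) (some hi) = t.length + 1 := by
            simp [pvCnt, List.countP_append, hct, hvh]
          have h2 : pvCnt res (some hi) = t.length := by rw [pvCnt, hres, hct]
          rw [h1, h2, hcv]
          simp [pvOk, hvh]
        · have h1 : pvCnt (t ++ [v]) (some hi) = pvCnt res (some hi) := by
            simp [pvCnt, List.countP_append, hvh, hres]
          rw [h1]
          simp [pvOk, hvh]
  | cons w r' =>
    have hw : v ≤ w := hr w (by rw [hre]; exact List.mem_cons_self)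
    have hr'w : ∀ x ∈ r', w < x := by
      rw [hre] at hsr; exact (List.pairwise_cons.mp hsr).1
    have hlen : res.length = t.length + 1 + r'.length := by
      rw [← hdec, hre]; simp; omega
    have hstep : pvLisStep res v = t ++ v :: r' := by
      simp only [pvLisStep, hbemerge]
      rw [if_neg (by omega)]
      rw [← hdec, hre]
      exact pvSet_mid t r' w v
    rw [hstep]
    constructor
    · rw [List.pairwise_append]
      refine ⟨hst, ?_, ?_⟩
      · rw [List.pairwise_cons]
        refine ⟨fun x hx => lt_of_le_of_lt hw (hr'w x hx), ?_⟩
        rw [hre] at hsr; exact (List.pairwise_cons.mp hsr).2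
      · intro a ha b hb
        rcases List.mem_cons.mp hb with h | h
        · rw [h]; exact ht a ha
        · have := hr'w b h; have := ht a ha; omega
    · intro hi?
      cases hi? with
      | none =>
        have h1 : pvCnt (t ++ v :: r') none = res.length := by simp [pvCnt, hlen]; omega
        have h2 : pvCnt res none = res.length := rfl
        rw [h1, h2, hcv]
        simp [pvOk]
        omega
      | some hi =>
        have hresc : pvCnt res (some hi) =
            t.countP (fun x => decide (x < hi)) + ((if w < hi then 1 else 0) + r'.countP (fun x => decide (x < hi))) := by
          rw [pvCnt, ← hdec, hre, List.countP_append, List.countP_cons]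
          by_cases hwh : w < hi <;> simp [hwh] <;> omega
        have hlhs : pvCnt (t ++ v :: r') (some hi) =
            t.countP (fun x => decide (x < hi)) + ((if v < hi then 1 else 0) + r'.countP (fun x => decide (x < hi))) := by
          rw [pvCnt, List.countP_append, List.countP_cons]
          by_cases hvh : v < hi <;> simp [hvh] <;> omega
        by_cases hvh : v < hi
        · have hct : t.countP (fun x => decide (x < hi)) = t.length :=
            List.countP_eq_length.mpr (by intro a ha; simp; have := ht a ha; omega)
          by_cases hwh : w < hi
          · rw [hlhs, hresc, hcv]
            have hcle : r'.countP (fun x => decide (x < hi)) ≤ r'.length := List.countP_le_length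
            simp [pvOk, hvh, hwh, hct]
          · have hcr' : r'.countP (fun x => decide (x < hi)) = 0 :=
              List.countP_eq_zero.mpr (by intro a ha; simp; have := hr'w a ha; omega)
            rw [hlhs, hresc, hcv]
            simp [pvOk, hvh, hwh, hct, hcr']
        · have hwh : ¬ (w < hi) := by omega
          rw [hlhs, hresc]
          simp [pvOk, hvh, hwh]

-- A's patience fold computes pvLisL on every bound at once
theorem pvPatience (w : List Int) :
    (w.foldl pvLisStep []).Pairwise (· < ·) ∧
    ∀ hi?, pvCnt (w.foldl pvLisStep []) hi? = pvLisL w hi? := by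
  induction w using List.reverseRecOn with
  | nil =>
    refine ⟨List.Pairwise.nil, fun hi? => ?_⟩
    cases hi? <;> rfl
  | append_singleton p v ih =>
    rw [List.foldl_concat]
    obtain ⟨ihs, ihc⟩ := ih
    obtain ⟨hs', hc'⟩ := pvStep_inv (p.foldl pvLisStep []) v ihs
    refine ⟨hs', fun hi? => ?_⟩
    rw [hc' hi?, pvLisL_snoc, ihc hi?, ihc (some v)]

theorem pvLisL_pos (w : List Int) (hw : w ≠ []) : 1 ≤ pvLisL w none := by
  obtain ⟨p, v, rfl⟩ := List.eq_nil_or_concat w |>.resolve_left hw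
  rw [List.concat_eq_append, pvLisL_snoc]
  simp [pvOk]

-- the running best in B's inner DP scan never decreases
theorem pvInner_ge (v : Int) (pairs : List (Int × Int)) (b : Int) :
    b ≤ pairs.foldl (fun b ud => if ud.1 < v ∧ b < ud.2 then ud.2 else b) b := by
  induction pairs generalizing b with
  | nil => simp
  | cons ud t ih =>
    simp only [List.foldl_cons]
    by_cases h : ud.1 < v ∧ b < ud.2
    · rw [if_pos h]; exact le_trans (le_of_lt h.2) (ih ud.2)
    · rw [if_neg h]; exact ih b

-- invariant of B's DP fold: dp holds the per-position LIS lengths, queried through the inner scan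
theorem pvQuad_inv (w : List Int) :
    ∀ (p s : List Int), p ++ s = w →
      (p.foldl
          (fun dp v =>
            dp ++ [(w.zip dp).foldl (fun b ud => if ud.1 < v ∧ b < ud.2 then ud.2 else b) 0 + 1])
          ([] : List Int)).length = p.length ∧
      (∀ v, ((w.zip (p.foldl
          (fun dp v =>
            dp ++ [(w.zip dp).foldl (fun b ud => if ud.1 < v ∧ b < ud.2 then ud.2 else b) 0 + 1])
          ([] : List Int))).foldl (fun b ud => if ud.1 < v ∧ b < ud.2 then ud.2 else b) 0)
        = (pvLisL p (some v) : Int)) ∧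
      ((p.foldl
          (fun dp v =>
            dp ++ [(w.zip dp).foldl (fun b ud => if ud.1 < v ∧ b < ud.2 then ud.2 else b) 0 + 1])
          ([] : List Int)).foldl max 0 = (pvLisL p none : Int)) ∧
      (∀ d ∈ (p.foldl
          (fun dp v =>
            dp ++ [(w.zip dp).foldl (fun b ud => if ud.1 < v ∧ b < ud.2 then ud.2 else b) 0 + 1])
          ([] : List Int)), 1 ≤ d) := by
  intro p
  induction p using List.reverseRecOn with
  | nil =>
    intro s hs
    refine ⟨rfl, fun v => ?_, rfl, by simp⟩
    rw [← hs]
    simp [pvLisL, pvLisR]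
  | append_singleton p v ihp =>
    intro s hs
    have hpw : p ++ (v :: s) = w := by rw [← hs]; simp
    obtain ⟨ihlen, ihinner, ihmax, ihpos⟩ := ihp (v :: s) hpw
    set F := fun (dp : List Int) (v : Int) =>
        dp ++ [(w.zip dp).foldl (fun b ud => if ud.1 < v ∧ b < ud.2 then ud.2 else b) 0 + 1]
      with hF
    set dp := p.foldl F [] with hdp
    have hstep : (p ++ [v]).foldl F [] = dp ++
        [(w.zip dp).foldl (fun b ud => if ud.1 < v ∧ b < ud.2 then ud.2 else b) 0 + 1] := by
      rw [List.foldl_concat]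
    set bp := (w.zip dp).foldl (fun b ud => if ud.1 < v ∧ b < ud.2 then ud.2 else b) 0 with hbp
    have hbpv : bp = (pvLisL p (some v) : Int) := ihinner v
    have hzip' : w.zip (dp ++ [bp + 1]) = w.zip dp ++ [(v, bp + 1)] := by
      conv_lhs => rw [← hpw]
      have h1 : p.length = dp.length := ihlen.symm
      have := List.zip_append (l₁ := p) (r₁ := v :: s) (l₂ := dp) (r₂ := [bp + 1]) h1
      rw [this]
      have : w.zip dp = p.zip dp := by
        conv_lhs => rw [← hpw, ← List.append_nil dp]
        rw [List.zip_append h1]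
        simp
      rw [this]
      simp
    refine ⟨?_, fun v' => ?_, ?_, ?_⟩
    · rw [hstep]; simp [ihlen]
    · rw [hstep, hzip', List.foldl_append]
      simp only [List.foldl_cons, List.foldl_nil]
      rw [ihinner v', pvLisL_snoc, hbpv]
      simp only [pvOk]
      by_cases hvv : v < v'
      · by_cases hlt : ((pvLisL p (some v') : Nat) : Int) < ((pvLisL p (some v) : Nat) : Int) + 1
        · rw [if_pos ⟨hvv, hlt⟩, if_pos (by simp [hvv])]
          push_cast
          omega
        · rw [if_neg (by tauto), if_pos (by simp [hvv])]
          push_cast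
          omega
      · rw [if_neg (by tauto), if_neg (by simp [hvv])]
    · rw [hstep, List.foldl_concat, ihmax, pvLisL_snoc, hbpv]
      simp only [pvOk, if_true]
      push_cast
      omega
    · rw [hstep]
      intro d hd
      rcases List.mem_append.mp hd with h | h
      · exact ihpos d h
      · rw [List.mem_singleton.mp h]
        have := pvInner_ge v (w.zip dp) 0
        rw [← hbp] at *
        omega

theorem pvQuad_eq (w : List Int) : pvQuadLIS w = (pvLisL w none : Int) := by
  obtain ⟨hlen, hinner, hmax, hpos⟩ := pvQuad_inv w w [] (by simp)
  show (PySem.List.max? (w.foldl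
      (fun dp v =>
        dp ++ [(w.zip dp).foldl (fun b ud => if ud.1 < v ∧ b < ud.2 then ud.2 else b) 0 + 1])
      ([] : List Int)) (fun y => y)).getD 0 = _
  cases hdp : w.foldl
      (fun dp v =>
        dp ++ [(w.zip dp).foldl (fun b ud => if ud.1 < v ∧ b < ud.2 then ud.2 else b) 0 + 1])
      ([] : List Int) with
  | nil =>
    rw [hdp] at hmax
    simp at hmax
    simp [← hmax]
    rfl
  | cons d t =>
    rw [hdp] at hmax hpos
    rw [PySem.List.max?_id_cons]
    simp only [Option.getD_some]
    have hd1 : 1 ≤ d := hpos d List.mem_cons_self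
    have hmx : max 0 d = d := by omega
    rw [List.foldl_cons, hmx] at hmax
    exact hmax

-- reading a range of indices out of a list is a drop/take slice
theorem pvMapRange (xs : List Int) (b : Int) (hb : b ≤ xs.length) :
    ∀ (k : Nat) (a : Int), 0 ≤ a → (b - a).toNat = k →
      (PySem.List.pyRange a b 1).map (fun i => PySem.List.pyGetD xs i 0) =
        (xs.drop a.toNat).take k := by
  intro k
  induction k with
  | zero =>
    intro a h0 hk
    rw [PySem.List.pyRange_one_eq_nil (by omega)]
    simp
  | succ k ih =>
    intro a h0 hk
    have hab : a < b := by omega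
    have halen : a.toNat < xs.length := by omega
    rw [PySem.List.pyRange_one_cons hab]
    rw [List.map_cons]
    rw [PySem.List.pyGetD_eq_getElem xs 0 h0 (by omega)]
    rw [ih (a + 1) (by omega) (by omega)]
    have h1 : (a + 1).toNat = a.toNat + 1 := by omega
    rw [h1]
    rw [List.drop_eq_getElem_cons halen]
    rfl

-- A's per-window result is pvLisL of the window
theorem pvLIS_eq (nums2 : List Int) (x n : Int) (hx : 0 ≤ x) (hn : 0 < n)
    (hlen : x + n + 1 ≤ (nums2.length : Int)) :
    pvLIS nums2 x (x + n) =
      ((pvLisL ((PySem.List.pyRange x (x + n + 1) 1).map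
          (fun i => PySem.List.pyGetD nums2 i 0)) none : Nat) : Int) := by
  have hcons : PySem.List.pyRange x (x + n + 1) 1 =
      x :: PySem.List.pyRange (x + 1) (x + n + 1) 1 := PySem.List.pyRange_one_cons (by omega)
  rw [hcons, List.map_cons]
  show ((((PySem.List.pyRange (x + 1) (x + n + 1) 1).foldl
      (fun res i => pvLisStep res (PySem.List.pyGetD nums2 i 0))
      [PySem.List.pyGetD nums2 x 0]).length : Nat) : Int) = _
  rw [← List.foldl_map (f := fun i => PySem.List.pyGetD nums2 i 0) (g := pvLisStep)]
  rw [show [PySem.List.pyGetD nums2 x 0] = pvLisStep [] (PySem.List.pyGetD nums2 x 0) from rfl]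
  rw [← List.foldl_cons]
  have := (pvPatience ((PySem.List.pyGetD nums2 x 0) ::
      (PySem.List.pyRange (x + 1) (x + n + 1) 1).map (fun i => PySem.List.pyGetD nums2 i 0))).2 none
  rw [pvCnt] at this
  rw [this]

theorem pvMain (nums : List Int) (h : nums ≠ []) : solve nums = solve_alt nums := by
  set n : Int := (nums.length : Int) with hn
  have hn1 : 1 ≤ n := by
    have := List.length_pos_iff.mpr h
    omega
  set nums2 := nums ++ nums with hnums2
  have hlen2 : (nums2.length : Int) = 2 * n := by simp [hnums2, hn]; omega
  set W : Int → List Int := fun x =>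
    (PySem.List.pyRange x (x + n + 1) 1).map (fun i => PySem.List.pyGetD nums2 i 0) with hW
  set V : Int → Int := fun x => ((pvLisL (W x) none : Nat) : Int) with hV
  have hWne : ∀ x : Int, W x ≠ [] := by
    intro x
    simp only [hW]
    rw [PySem.List.pyRange_one_cons (by omega : x < x + n + 1)]
    simp
  have hV1 : ∀ x : Int, 1 ≤ V x := by
    intro x
    have := pvLisL_pos (W x) (hWne x)
    rw [hV]
    simp
    omega
  -- A's side
  have hA : solve nums = (PySem.List.max? ((PySem.List.pyRange 0 n 1).map V) (fun y => y)).getD 0 := by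
    show (PySem.List.max? ((PySem.List.pyRange 0 n 1).map
        (fun x => pvLIS nums2 x (x + n))) (fun y => y)).getD 0 = _
    congr 1
    apply congrArg (fun l => PySem.List.max? l (fun y => y))
    apply List.map_congr_left
    intro x hx
    rw [PySem.List.mem_pyRange_one] at hx
    rw [pvLIS_eq nums2 x n hx.1 (by omega) (by omega)]
  -- B's side
  have hB : solve_alt nums = ((PySem.List.pyRange 0 n 1).map V).foldl max 0 := by
    show (PySem.List.pyRange 0 n 1).foldl
        (fun best start =>
          max best (pvQuadLIS (PySem.List.slice nums2 (some start) (some (start + n + 1))))) 0 = _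
    have hcong := PySem.List.foldl_congr_mem (l := PySem.List.pyRange 0 n 1) (init := (0 : Int))
      (f := fun best start =>
        max best (pvQuadLIS (PySem.List.slice nums2 (some start) (some (start + n + 1)))))
      (g := fun best x => max best (V x)) ?_
    · rw [hcong, ← List.foldl_map (f := V) (g := max)]
    · intro acc x hx
      rw [PySem.List.mem_pyRange_one] at hx
      show max acc (pvQuadLIS (PySem.List.slice nums2 (some x) (some (x + n + 1)))) = max acc (V x)
      have hslice : PySem.List.slice nums2 (some x) (some (x + n + 1)) = W x := by
        simp only [hW]
        rw [PySem.List.slice_toNat nums2 (by omega) (by omega)]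
        rw [pvMapRange nums2 (x + n + 1) (by omega) ((x + n + 1).toNat - x.toNat) x (by omega) (by omega)]
      rw [hslice, pvQuad_eq]
  rw [hA, hB]
  -- max? of a nonempty list of values ≥ 1 is their running max from 0
  rw [PySem.List.pyRange_one_cons (by omega : (0:Int) < n), List.map_cons]
  rw [PySem.List.max?_id_cons]
  simp only [Option.getD_some]
  rw [List.foldl_cons]
  have : max 0 (V 0) = V 0 := by have := hV1 0; omega
  rw [this]

-- ===== VERDICT (by name: the statement is the Claim_ definition above) =====
theorem solve_spec : Claim_equal_solve := by
  intro nums _ hpre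
  show solve nums = solve_alt nums
  exact pvMain nums hpre
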